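-- pv_equiv track=rewrite | github.com/youngminpark2559/kaggle | SPIE-AAPM-NCI_BreastPathQ_Cancer_Cellularity_Challenge_2019/src/utils/utils_common.py | divisorGenerator
-- ===== SOURCE A (Python) =====
-- import math
--
-- def divisorGenerator(n):
--     large_divisors=[]
--     for i in range(1,int(math.sqrt(n)+1)):
--         if n%i==0:
--             yield i
--             if i*i!=n:
--                 large_divisors.append(n/i)
--     for divisor in reversed(large_divisors):
--         yield int(divisor)
-- ===== SOURCE B (Python) =====
-- import math
--
-- def divisorGenerator(n):
--     # Factorize n into prime powers, build the divisor list by combining them,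
--     # then sort once and yield. (No sqrt-pairing of i with n/i.)
--     if n <= 0:
--         return
--     divisors = [1]
--     m = n
--     p = 2
--     while p * p <= m:
--         if m % p == 0:
--             e = 0
--             while m % p == 0:
--                 m //= p
--                 e += 1
--             divisors = [d * p ** k for d in divisors for k in range(e + 1)]
--         p += 1
--     if m > 1:
--         divisors = [d for x in divisors for d in (x, x * m)]
--     for d in sorted(divisors):
--         yield d
-- ===== Notes on version B (the rewrite author's own statement) =====
-- stated objective: alternative
-- what changed: A scans i=1..sqrt(n) pairing each small divisor i with its cofactor n/i (yield smalls ascending, replay a large-divisor buffer reversed); B instead factorizes n into prime powers by trial division, builds the divisor list as products of prime powers, and yields sorted(divisors) once.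
import Mathlib
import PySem

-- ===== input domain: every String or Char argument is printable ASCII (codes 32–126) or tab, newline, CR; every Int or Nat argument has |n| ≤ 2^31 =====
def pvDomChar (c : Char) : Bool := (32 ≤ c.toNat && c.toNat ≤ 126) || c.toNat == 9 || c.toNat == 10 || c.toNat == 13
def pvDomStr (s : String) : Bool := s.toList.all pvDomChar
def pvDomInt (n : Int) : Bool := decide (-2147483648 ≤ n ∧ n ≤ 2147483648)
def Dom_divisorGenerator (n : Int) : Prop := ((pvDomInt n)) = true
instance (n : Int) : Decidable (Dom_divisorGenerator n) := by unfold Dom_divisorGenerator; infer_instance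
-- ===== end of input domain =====

-- B replaces A's sqrt-pairing scan (small divisor i paired with cofactor n/i, larges replayed
-- reversed) by trial-division PRIME FACTORIZATION: divisors are built as products of prime powers
-- and sorted once. Generators: the value compared is the yielded sequence.

-- ===== PORT A =====
-- int(math.sqrt(n)) is ported as an exact integer square root (binary search, kernel-reducible);
-- the float sqrt is exact enough that this agrees for 0 ≤ n ≤ 2^31 (the Dom range).
-- int(n/i) on an exact nonnegative division equals floor division, ported as PySem.Int.floordiv.
def pySqrtGo : Nat → Int → Int → Int → Int
  | 0, lo, _, _ => lo
  | f + 1, lo, hi, n =>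
    if hi - lo ≤ 1 then lo
    else if (PySem.Int.floordiv (lo + hi) 2) * (PySem.Int.floordiv (lo + hi) 2) ≤ n then
      pySqrtGo f (PySem.Int.floordiv (lo + hi) 2) hi n
    else
      pySqrtGo f lo (PySem.Int.floordiv (lo + hi) 2) n

def pySqrt (n : Int) : Int := pySqrtGo 64 0 (n + 1) n

def divisorGenerator (n : Int) : List Int :=
  let s : Int := pySqrt n
  let st := (PySem.List.pyRange 1 (s + 1) 1).foldl
    (fun (st : List Int × List Int) i =>
      if PySem.Int.mod n i == 0 then
        (st.1 ++ [i], if i * i != n then st.2 ++ [PySem.Int.floordiv n i] else st.2)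
      else st) ([], [])
  st.1 ++ st.2.reverse

-- ===== PORT B =====
-- the inner 'while m % p == 0' strip loop: returns (m with all factors p removed, exponent e).
-- The fuel argument and the '2 <= p, 0 < m' guard conjuncts only make the recursion total
-- (fuel m.toNat always suffices: m shrinks by a factor >= 2 each pass); on reachable states
-- the test is exactly Python's 'm % p == 0'.
def altStripF : Nat → Int → Int → Int × Int
  | 0, m, _ => (m, 0)
  | fuel + 1, m, p =>
    if 2 ≤ p ∧ 0 < m ∧ PySem.Int.mod m p = 0 then
      let r := altStripF fuel (PySem.Int.floordiv m p) p
      (r.1, r.2 + 1)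
    else (m, 0)

def altStrip (m p : Int) : Int × Int := altStripF m.toNat m p

-- the comprehension '[d * p ** k for d in divisors for k in range(e + 1)]'
def altExpand (dvs : List Int) (p e : Int) : List Int :=
  dvs.flatMap (fun d => (PySem.List.pyRange 0 (e + 1) 1).map (fun k => d * p ^ k.toNat))

-- the outer 'while p * p <= m' trial-division loop; fuel (m + 1 - p).toNat always suffices
-- (the measure m + 1 - p strictly decreases each iteration).
def altOuterF : Nat → List Int → Int → Int → List Int × Int
  | 0, dvs, m, _ => (dvs, m)
  | fuel + 1, dvs, m, p =>
    if 2 ≤ p ∧ p * p ≤ m then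
      if PySem.Int.mod m p = 0 then
        let r := altStrip m p
        altOuterF fuel (altExpand dvs p r.2) r.1 (p + 1)
      else altOuterF fuel dvs m (p + 1)
    else (dvs, m)

def altOuter (dvs : List Int) (m p : Int) : List Int × Int :=
  altOuterF (m + 1 - p).toNat dvs m p

def divisorGenerator_alt (n : Int) : List Int :=
  if n ≤ 0 then []
  else
    let r := altOuter [1] n 2
    let divisors := if 1 < r.2 then r.1.flatMap (fun x => [x, x * r.2]) else r.1
    PySem.List.sorted divisors (fun x => x) false

-- ===== PRECONDITION & SPEC =====
-- math.sqrt raises ValueError on negative n in A, so negative inputs are excluded.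
def Pre_divisorGenerator (n : Int) : Prop := 0 ≤ n
instance (n : Int) : Decidable (Pre_divisorGenerator n) := by unfold Pre_divisorGenerator; infer_instance
def pvWitness_divisorGenerator : Int := (36)

def Spec_divisorGenerator (n : Int) (out : List Int) : Prop := out = divisorGenerator_alt n
instance (n : Int) (out : List Int) : Decidable (Spec_divisorGenerator n out) := by unfold Spec_divisorGenerator; infer_instance

-- ===== CLAIM (what is proved, stated in full; the proofs are below) =====
def Claim_equal_divisorGenerator : Prop := ∀ (n : Int), Dom_divisorGenerator n → Pre_divisorGenerator n → Spec_divisorGenerator n (divisorGenerator n)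

-- ===== LEMMAS AND PROOFS =====

-- A's loop, with its pair of accumulators, as filters of the range.
theorem foldA (n : Int) : ∀ (l : List Int) (st : List Int × List Int),
    l.foldl
      (fun (st : List Int × List Int) i =>
        if PySem.Int.mod n i == 0 then
          (st.1 ++ [i], if i * i != n then st.2 ++ [PySem.Int.floordiv n i] else st.2)
        else st) st
    = (st.1 ++ l.filter (fun i => PySem.Int.mod n i == 0),
       st.2 ++ (l.filter (fun i => (PySem.Int.mod n i == 0) && (i * i != n))).map
         (fun i => PySem.Int.floordiv n i)) := by
  intro l
  induction l with
  | nil => intro st; simp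
  | cons a l ih =>
    intro st
    rw [List.foldl_cons, ih]
    by_cases hp : PySem.Int.mod n a = 0
    · by_cases hq : a * a = n
      · simp [hp, hq]
      · simp [hp, hq]
    · simp [hp]

-- divisibility fact for members of the filtered range
theorem div_mul_eq (n i : Int) (h : PySem.Int.mod n i = 0) :
    PySem.Int.floordiv n i * i = n := by
  have := PySem.Int.floordiv_mul_add_mod n i
  omega

theorem pySqrtGo_spec (f : Nat) : ∀ (lo hi n : Int), 0 ≤ lo → lo < hi → lo * lo ≤ n →
    n < hi * hi → hi - lo ≤ 2 ^ f →
    0 ≤ pySqrtGo f lo hi n ∧ pySqrtGo f lo hi n * pySqrtGo f lo hi n ≤ n ∧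
      n < (pySqrtGo f lo hi n + 1) * (pySqrtGo f lo hi n + 1) := by
  induction f with
  | zero =>
    intro lo hi n h0 h1 h2 h3 hf
    have : hi = lo + 1 := by norm_num at hf; omega
    subst this
    exact ⟨h0, h2, h3⟩
  | succ f ih =>
    intro lo hi n h0 h1 h2 h3 hf
    rw [pySqrtGo]
    by_cases hsm : hi - lo ≤ 1
    · rw [if_pos hsm]
      have : hi = lo + 1 := by omega
      subst this
      exact ⟨h0, h2, h3⟩
    · rw [if_neg hsm]
      have hmid : PySem.Int.floordiv (lo + hi) 2 = (lo + hi) / 2 :=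
        PySem.Int.floordiv_eq_ediv_of_pos (by omega)
      have hml : lo < PySem.Int.floordiv (lo + hi) 2 := by rw [hmid]; omega
      have hmh : PySem.Int.floordiv (lo + hi) 2 < hi := by rw [hmid]; omega
      have hfuel2 : hi - PySem.Int.floordiv (lo + hi) 2 ≤ 2 ^ f ∧
          PySem.Int.floordiv (lo + hi) 2 - lo ≤ 2 ^ f := by
        rw [pow_succ] at hf
        rw [hmid]
        generalize (2:Int) ^ f = P at hf ⊢
        omega
      by_cases hc : (PySem.Int.floordiv (lo + hi) 2) * (PySem.Int.floordiv (lo + hi) 2) ≤ n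
      · rw [if_pos hc]
        exact ih _ hi n (by omega) hmh hc h3 hfuel2.1
      · rw [if_neg hc]
        exact ih lo _ n h0 hml h2 (by omega) hfuel2.2

-- pySqrt n is the exact integer square root on the Dom range
theorem sqrt_bounds (n : Int) (hn : 0 ≤ n) (hbig : n ≤ 2147483648) :
    pySqrt n * pySqrt n ≤ n ∧ n < (pySqrt n + 1) * (pySqrt n + 1) := by
  have h64 : (2:Int) ^ 64 = 18446744073709551616 := by norm_num
  have h := pySqrtGo_spec 64 0 (n + 1) n (le_refl 0) (by omega) (by simpa using hn)
    (by nlinarith) (by omega)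
  exact ⟨h.2.1, h.2.2⟩

-- A's output is strictly increasing
theorem A_pairwise (n : Int) (hpre : 0 ≤ n) (hbig : n ≤ 2147483648) :
    (divisorGenerator n).Pairwise (· < ·) := by
  rw [divisorGenerator]
  set s : Int := pySqrt n with hs
  obtain ⟨hssn, hnss⟩ := sqrt_bounds n hpre hbig
  rw [foldA]
  simp only [List.nil_append]
  have hrange : (PySem.List.pyRange 1 (s + 1) 1).Pairwise (· < ·) :=
    PySem.List.pairwise_lt_pyRange_one 1 (s + 1)
  have hmem : ∀ i : Int, i ∈ PySem.List.pyRange 1 (s + 1) 1 → 1 ≤ i ∧ i ≤ s := by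
    intro i hi
    have := (PySem.List.mem_pyRange_one).1 hi
    omega
  rw [List.pairwise_append]
  refine ⟨(hrange.sublist List.filter_sublist), ?_, ?_⟩
  · rw [List.pairwise_reverse, List.pairwise_map]
    have h2 : (List.filter (fun i => (PySem.Int.mod n i == 0) && (i * i != n))
        (PySem.List.pyRange 1 (s + 1) 1)).Pairwise (· < ·) :=
      hrange.sublist List.filter_sublist
    refine List.Pairwise.imp_of_mem ?_ h2
    intro a b ha hb hab
    have hma := List.mem_filter.1 ha
    have hmb := List.mem_filter.1 hb
    obtain ⟨ha1, ha2⟩ := hmem a hma.1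
    obtain ⟨hb1, hb2⟩ := hmem b hmb.1
    have hda : PySem.Int.mod n a = 0 := by
      have := hma.2; simp at this; exact this.1
    have hdb : PySem.Int.mod n b = 0 := by
      have := hmb.2; simp at this; exact this.1
    have hga := div_mul_eq n a hda
    have hgb := div_mul_eq n b hdb
    have hnpos : 0 < n := by nlinarith
    have hgapos : 0 < PySem.Int.floordiv n a := by nlinarith
    show PySem.Int.floordiv n b < PySem.Int.floordiv n a
    by_contra hle
    push Not at hle
    have h1 : PySem.Int.floordiv n a * a < PySem.Int.floordiv n a * b :=
      mul_lt_mul_of_pos_left hab hgapos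
    have h2 : PySem.Int.floordiv n a * b ≤ PySem.Int.floordiv n b * b :=
      mul_le_mul_of_nonneg_right hle (by omega)
    linarith
  · intro a ha b hb
    have hma := List.mem_filter.1 ha
    obtain ⟨ha1, ha2⟩ := hmem a hma.1
    rw [List.mem_reverse, List.mem_map] at hb
    obtain ⟨i, hi, hbi⟩ := hb
    have hmi := List.mem_filter.1 hi
    obtain ⟨hi1, hi2⟩ := hmem i hmi.1
    have hdi : PySem.Int.mod n i = 0 ∧ i * i ≠ n := by
      have := hmi.2; simp at this; exact this
    have hgi := div_mul_eq n i hdi.1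
    have hslt : s < PySem.Int.floordiv n i := by
      by_contra hle
      push Not at hle
      set g := PySem.Int.floordiv n i with hg
      have hnpos : 0 < n := by nlinarith
      have hgpos : 0 < g := by nlinarith
      have h1 : n ≤ s * i := by nlinarith
      have h2 : s * i ≤ s * s := by nlinarith
      have hsi : s * i = n := le_antisymm (le_trans h2 hssn) h1
      have hss : s * s = n := le_antisymm hssn (by omega)
      have hspos : 0 < s := by nlinarith
      have : i = s := by
        have h3 : s * i = s * s := by omega
        exact mul_left_cancel₀ (by omega) h3
      exact hdi.2 (by nlinarith)
    subst hbi
    exact lt_of_le_of_lt ha2 hslt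

-- A's output is exactly the positive divisors
theorem A_mem (n : Int) (hpre : 1 ≤ n) (hbig : n ≤ 2147483648) (x : Int) :
    x ∈ divisorGenerator n ↔ 0 < x ∧ x ∣ n := by
  rw [divisorGenerator]
  set s : Int := pySqrt n with hs
  obtain ⟨hssn, hnss⟩ := sqrt_bounds n (by omega) hbig
  rw [foldA]
  simp only [List.nil_append, List.mem_append, List.mem_reverse, List.mem_map,
    List.mem_filter, PySem.List.mem_pyRange_one]
  constructor
  · rintro (⟨⟨h1, h2⟩, h3⟩ | ⟨i, ⟨⟨hi1, hi2⟩, hi3⟩, rfl⟩)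
    · simp only [beq_iff_eq] at h3
      exact ⟨by omega, (PySem.Int.mod_eq_zero_iff_dvd n x).1 h3⟩
    · simp only [Bool.and_eq_true, beq_iff_eq, bne_iff_ne, ne_eq] at hi3
      have hgi := div_mul_eq n i hi3.1
      have hpos : 0 < PySem.Int.floordiv n i := by nlinarith
      exact ⟨hpos, ⟨i, hgi.symm⟩⟩
  · rintro ⟨hx0, hxd⟩
    by_cases hxs : x ≤ s
    · left
      refine ⟨⟨by omega, by omega⟩, ?_⟩
      simp [PySem.Int.mod_eq_zero_iff_dvd, hxd]
    · right
      obtain ⟨c, hc⟩ := hxd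
      have hc0 : 0 < c := by nlinarith
      have hcs : c ≤ s := by nlinarith
      have hcd : c ∣ n := ⟨x, by rw [hc]; ring⟩
      have hcm : PySem.Int.mod n c = 0 := (PySem.Int.mod_eq_zero_iff_dvd n c).2 hcd
      have hfdc : PySem.Int.floordiv n c = x := by
        have h1 := div_mul_eq n c hcm
        have : x * c = PySem.Int.floordiv n c * c := by rw [h1, hc]
        exact (mul_right_cancel₀ (by omega) this).symm
      refine ⟨c, ⟨⟨by omega, by omega⟩, ?_⟩, hfdc⟩
      simp only [Bool.and_eq_true, beq_iff_eq, bne_iff_ne, ne_eq]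
      refine ⟨hcm, fun hcc => ?_⟩
      have : c = x := by
        have : c * c = x * c := by rw [hcc, hc]
        exact (mul_right_cancel₀ (by omega) this)
      omega

theorem prime_two_le (q : Int) (hq : Prime q) (h0 : 0 < q) : 2 ≤ q := by
  have := Int.prime_iff_natAbs_prime.1 hq
  have := this.two_le
  omega

theorem exists_prime_dvd (m : Int) (h : 2 ≤ m) : ∃ q : Int, Prime q ∧ 0 < q ∧ q ∣ m := by
  obtain ⟨q, hq, hqd⟩ := Nat.exists_prime_and_dvd (n := m.toNat) (by omega)
  refine ⟨(q : Int), Int.prime_iff_natAbs_prime.2 (by simpa using hq), by exact_mod_cast hq.pos, ?_⟩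
  have hmt : (m.toNat : Int) = m := by omega
  rw [← hmt]
  exact_mod_cast hqd

theorem prime_dvd_prime (q p : Int) (hq : Prime q) (hp : Prime p) (h0q : 0 < q) (h0p : 0 < p)
    (hd : q ∣ p) : q = p := by
  have h1 : q.natAbs ∣ p.natAbs := Int.natAbs_dvd_natAbs.2 hd
  have h2 := Int.prime_iff_natAbs_prime.1 hq
  have h3 := Int.prime_iff_natAbs_prime.1 hp
  have h4 : q.natAbs = p.natAbs := (Nat.prime_dvd_prime_iff_eq h2 h3).1 h1
  omega

-- if every prime factor of m is ≥ p and p ∣ m, then p itself is prime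
theorem prime_of_min_factor (p m : Int) (hp : 2 ≤ p) (hm : 1 ≤ m)
    (hpfm : ∀ q : Int, Prime q → 0 < q → q ∣ m → p ≤ q) (hdvd : p ∣ m) : Prime p := by
  obtain ⟨q, hq, hq0, hqp⟩ := exists_prime_dvd p hp
  have h1 : q ≤ p := Int.le_of_dvd (by omega) hqp
  have h2 : p ≤ q := hpfm q hq hq0 (hqp.trans hdvd)
  have : q = p := by omega
  rwa [← this]

-- the strip result never grows / shrinks strictly
theorem altStripF_fst_le (f : Nat) : ∀ (m p : Int), 0 ≤ m → (altStripF f m p).1 ≤ m := by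
  induction f with
  | zero => intro m p hm; exact le_refl m
  | succ f ih =>
    intro m p hm
    rw [altStripF]
    by_cases hg : 2 ≤ p ∧ 0 < m ∧ PySem.Int.mod m p = 0
    · rw [if_pos hg]
      have h2 : 0 ≤ PySem.Int.floordiv m p := by
        rw [PySem.Int.floordiv_eq_ediv_of_pos (by omega)]
        exact Int.ediv_nonneg (by omega) (by omega)
      have h3 : PySem.Int.floordiv m p ≤ m := by
        rw [PySem.Int.floordiv_eq_ediv_of_pos (by omega)]
        exact Int.ediv_le_self p (by omega)
      exact le_trans (ih _ _ h2) h3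
    · rw [if_neg hg]

theorem altStrip_fst_lt (m p : Int) (h2 : 2 ≤ p) (hm : 0 < m)
    (hd : PySem.Int.mod m p = 0) : (altStrip m p).1 < m := by
  have hq : 0 ≤ PySem.Int.floordiv m p := by
    rw [PySem.Int.floordiv_eq_ediv_of_pos (by omega)]
    exact Int.ediv_nonneg (by omega) (by omega)
  have h1 : PySem.Int.floordiv m p < m := by
    rw [PySem.Int.floordiv_eq_ediv_of_pos (by omega)]
    rw [Int.ediv_lt_iff_lt_mul (by omega)]; nlinarith
  obtain ⟨t, ht⟩ : ∃ t, m.toNat = t + 1 := ⟨m.toNat - 1, by omega⟩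
  rw [altStrip, ht, altStripF, if_pos ⟨h2, hm, hd⟩]
  exact lt_of_le_of_lt (altStripF_fst_le t _ _ hq) h1

-- specification of the strip loop: m = m' * p^e with p ∤ m' (with sufficient fuel)
theorem altStripF_spec (f : Nat) : ∀ (m p : Int), 2 ≤ p → 1 ≤ m → m.toNat ≤ f →
    1 ≤ (altStripF f m p).1 ∧ 0 ≤ (altStripF f m p).2 ∧
    m = (altStripF f m p).1 * p ^ ((altStripF f m p).2.toNat) ∧ ¬ p ∣ (altStripF f m p).1 := by
  induction f with
  | zero => intro m p hp hm hf; omega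
  | succ f ih =>
    intro m p hp hm hf
    rw [altStripF]
    by_cases hg : 2 ≤ p ∧ 0 < m ∧ PySem.Int.mod m p = 0
    · rw [if_pos hg]
      have hdvd : p ∣ m := (PySem.Int.mod_eq_zero_iff_dvd m p).1 hg.2.2
      have hfl : PySem.Int.floordiv m p = m / p := PySem.Int.floordiv_eq_ediv_of_pos (by omega)
      have hq : 1 ≤ PySem.Int.floordiv m p := by
        rw [hfl]
        obtain ⟨c, hc⟩ := hdvd
        have hc1 : 1 ≤ c := by nlinarith [hg.2.1]
        calc (1:Int) ≤ c := hc1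
          _ = m / p := by rw [hc, Int.mul_ediv_cancel_left _ (by omega)]
      have hfuel : (PySem.Int.floordiv m p).toNat ≤ f := by
        have hlt : PySem.Int.floordiv m p < m := by
          rw [hfl, Int.ediv_lt_iff_lt_mul (by omega)]; nlinarith [hg.2.1]
        omega
      obtain ⟨h1, h2, h3, h4⟩ := ih (PySem.Int.floordiv m p) p hp hq hfuel
      refine ⟨h1, by show 0 ≤ (altStripF f (PySem.Int.floordiv m p) p).2 + 1; omega, ?_, h4⟩
      show m = (altStripF f (PySem.Int.floordiv m p) p).1 *
        p ^ (((altStripF f (PySem.Int.floordiv m p) p).2 + 1).toNat)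
      have ht : ((altStripF f (PySem.Int.floordiv m p) p).2 + 1).toNat
          = (altStripF f (PySem.Int.floordiv m p) p).2.toNat + 1 := by omega
      rw [ht, pow_succ, ← mul_assoc, ← h3, hfl]
      exact (Int.ediv_mul_cancel hdvd).symm
    · rw [if_neg hg]
      have hnd : ¬ p ∣ m := by
        intro hd
        exact hg ⟨hp, by omega, (PySem.Int.mod_eq_zero_iff_dvd m p).2 hd⟩
      exact ⟨hm, le_refl 0, by simp, hnd⟩

theorem altStrip_spec (m p : Int) (hp : 2 ≤ p) (hm : 1 ≤ m) :
    1 ≤ (altStrip m p).1 ∧ 0 ≤ (altStrip m p).2 ∧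
    m = (altStrip m p).1 * p ^ ((altStrip m p).2.toNat) ∧ ¬ p ∣ (altStrip m p).1 :=
  altStripF_spec m.toNat m p hp hm (le_refl _)

-- the decomposition d * p^k of a divisor is unique when p ∤ d, p ∤ d'
theorem pow_mul_inj (p d d' : Int) (hppos : 2 ≤ p) (hd : ¬ p ∣ d) (hd' : ¬ p ∣ d')
    (hdp : 0 < d) (k j : Nat) (h : d * p ^ k = d' * p ^ j) : k = j ∧ d = d' := by
  induction k generalizing d d' j with
  | zero =>
    cases j with
    | zero => simpa using h
    | succ j' =>
      exfalso
      apply hd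
      rw [pow_zero, mul_one] at h
      exact ⟨d' * p ^ j', by rw [h]; ring⟩
  | succ k' ih =>
    cases j with
    | zero =>
      exfalso
      apply hd'
      rw [pow_zero, mul_one] at h
      exact ⟨d * p ^ k', by rw [← h]; ring⟩
    | succ j' =>
      have hc : d * p ^ k' = d' * p ^ j' := by
        have : d * p ^ k' * p = d' * p ^ j' * p := by
          rw [mul_assoc, mul_assoc, ← pow_succ, ← pow_succ]; exact h
        exact mul_right_cancel₀ (by omega) this
      obtain ⟨h1, h2⟩ := ih d d' hd hd' hdp j' hc
      exact ⟨by omega, h2⟩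

-- positive divisors of a * p^e are exactly d * p^k, d ∣ a, k ≤ e
theorem dvd_mul_pow_iff (p a : Int) (hp : Prime p) (hppos : 0 < p) (e : Nat) (x : Int) (hx : 0 < x) :
    x ∣ a * p ^ e ↔ ∃ d : Int, ∃ k : Nat, 0 < d ∧ d ∣ a ∧ k ≤ e ∧ x = d * p ^ k := by
  constructor
  · intro hdvd
    induction e generalizing x with
    | zero =>
      rw [pow_zero, mul_one] at hdvd
      exact ⟨x, 0, hx, hdvd, le_refl 0, by ring⟩
    | succ e' ih =>
      by_cases hpx : p ∣ x
      · obtain ⟨x', hx'⟩ := hpx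
        have hx'pos : 0 < x' := by nlinarith
        obtain ⟨c, hc⟩ := hdvd
        have hc' : a * p ^ e' = x' * c := by
          have : p * (a * p ^ e') = p * (x' * c) := by
            rw [← mul_assoc, mul_comm p a, mul_assoc, ← pow_succ']
            rw [hc, hx']; ring
          exact mul_left_cancel₀ (by omega) this
        obtain ⟨d, k, hd1, hd2, hd3, hd4⟩ := ih x' hx'pos ⟨c, hc'⟩
        exact ⟨d, k + 1, hd1, hd2, by omega, by rw [hx', hd4, pow_succ]; ring⟩
      · have hcop : IsCoprime x p := ((Prime.coprime_iff_not_dvd hp).2 hpx).symm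
        have : x ∣ a := (hcop.pow_right).dvd_of_dvd_mul_right hdvd
        exact ⟨x, 0, hx, this, by omega, by ring⟩
  · rintro ⟨d, k, hd1, hd2, hd3, rfl⟩
    exact mul_dvd_mul hd2 (pow_dvd_pow p hd3)

-- loop invariant of the outer trial-division loop: on entry the divisors list enumerates the
-- divisors of the already-factored part a, all prime factors of m are ≥ p, those of a are < p;
-- on exit the list enumerates the divisors of some b with a*m = b*m', m' = 1 or a prime not dividing b.
theorem altOuterF_spec (f : Nat) : ∀ (dvs : List Int) (m p a : Int), 2 ≤ p → 1 ≤ m → 1 ≤ a →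
    (∀ q : Int, Prime q → 0 < q → q ∣ m → p ≤ q) →
    (∀ q : Int, Prime q → 0 < q → q ∣ a → q < p) →
    dvs.Nodup → (∀ x, x ∈ dvs ↔ 0 < x ∧ x ∣ a) → (m + 1 - p).toNat ≤ f →
    ∃ b : Int, 1 ≤ b ∧ a * m = b * (altOuterF f dvs m p).2 ∧
      (altOuterF f dvs m p).1.Nodup ∧
      (∀ x, x ∈ (altOuterF f dvs m p).1 ↔ 0 < x ∧ x ∣ b) ∧
      1 ≤ (altOuterF f dvs m p).2 ∧
      ((altOuterF f dvs m p).2 = 1 ∨ (Prime (altOuterF f dvs m p).2 ∧ ¬ (altOuterF f dvs m p).2 ∣ b)) := by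
  have exitCase : ∀ (dvs : List Int) (m p a : Int), 2 ≤ p → 1 ≤ m → 1 ≤ a →
      (∀ q : Int, Prime q → 0 < q → q ∣ m → p ≤ q) →
      (∀ q : Int, Prime q → 0 < q → q ∣ a → q < p) →
      dvs.Nodup → (∀ x, x ∈ dvs ↔ 0 < x ∧ x ∣ a) → m < p * p →
      ∃ b : Int, 1 ≤ b ∧ a * m = b * m ∧ dvs.Nodup ∧
        (∀ x, x ∈ dvs ↔ 0 < x ∧ x ∣ b) ∧ 1 ≤ m ∧
        (m = 1 ∨ (Prime m ∧ ¬ m ∣ b)) := by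
    intro dvs m p a hp hm1 ha hpfm hpfa hnd hmem hmlt
    refine ⟨a, ha, by ring, hnd, hmem, hm1, ?_⟩
    by_cases hm2 : m = 1
    · exact Or.inl hm2
    · right
      have hm2' : 2 ≤ m := by omega
      obtain ⟨q, hq, hq0, hqm⟩ := exists_prime_dvd m hm2'
      have hpq : p ≤ q := hpfm q hq hq0 hqm
      obtain ⟨t, ht⟩ := hqm
      have ht1 : 1 ≤ t := by nlinarith
      have htm : m = q ∨ 2 ≤ t := by
        by_cases h3 : t = 1
        · left; rw [ht, h3, mul_one]
        · right; omega
      have hmq : m = q := by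
        rcases htm with h4 | h4
        · exact h4
        · exfalso
          obtain ⟨q', hq', hq0', hq't⟩ := exists_prime_dvd t h4
          have hq'm : q' ∣ m := ht ▸ (hq't.mul_left q)
          have hpq' : p ≤ q' := hpfm q' hq' hq0' hq'm
          have hq't' : q' ≤ t := Int.le_of_dvd (by omega) hq't
          nlinarith
      constructor
      · rwa [hmq]
      · intro hma
        have := hpfa m (hmq ▸ hq) (by omega) hma
        omega
  induction f with
  | zero =>
    intro dvs m p a hp hm1 ha hpfm hpfa hnd hmem hf
    have hmlt : m < p * p := by nlinarith [show m < p by omega]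
    exact exitCase dvs m p a hp hm1 ha hpfm hpfa hnd hmem hmlt
  | succ f ih =>
    intro dvs m p a hp hm1 ha hpfm hpfa hnd hmem hf
    rw [altOuterF]
    by_cases hg : 2 ≤ p ∧ p * p ≤ m
    · rw [if_pos hg]
      by_cases hd : PySem.Int.mod m p = 0
      · rw [if_pos hd]
        show ∃ b : Int, 1 ≤ b ∧
          a * m = b * (altOuterF f (altExpand dvs p (altStrip m p).2) (altStrip m p).1 (p + 1)).2 ∧
          (altOuterF f (altExpand dvs p (altStrip m p).2) (altStrip m p).1 (p + 1)).1.Nodup ∧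
          (∀ x, x ∈ (altOuterF f (altExpand dvs p (altStrip m p).2) (altStrip m p).1 (p + 1)).1 ↔
            0 < x ∧ x ∣ b) ∧
          1 ≤ (altOuterF f (altExpand dvs p (altStrip m p).2) (altStrip m p).1 (p + 1)).2 ∧
          ((altOuterF f (altExpand dvs p (altStrip m p).2) (altStrip m p).1 (p + 1)).2 = 1 ∨
            (Prime (altOuterF f (altExpand dvs p (altStrip m p).2) (altStrip m p).1 (p + 1)).2 ∧
              ¬ (altOuterF f (altExpand dvs p (altStrip m p).2) (altStrip m p).1 (p + 1)).2 ∣ b))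
        have hm0 : 0 < m := by nlinarith [hg.1, hg.2]
        have hdvd : p ∣ m := (PySem.Int.mod_eq_zero_iff_dvd m p).1 hd
        have hpp : Prime p := prime_of_min_factor p m hg.1 (by omega) hpfm hdvd
        obtain ⟨hs1, hs2, hs3, hs4⟩ := altStrip_spec m p hg.1 (by omega)
        have hpa : ¬ p ∣ a := fun hpa' => absurd (hpfa p hpp (by omega) hpa') (lt_irrefl p)
        have hpd : ∀ d ∈ dvs, 0 < d ∧ d ∣ a ∧ ¬ p ∣ d := by
          intro d hdm
          obtain ⟨h1, h2⟩ := (hmem d).1 hdm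
          exact ⟨h1, h2, fun hc => hpa (hc.trans h2)⟩
        have hexp_mem : ∀ x, x ∈ altExpand dvs p (altStrip m p).2 ↔
            0 < x ∧ x ∣ a * p ^ (altStrip m p).2.toNat := by
          intro x
          simp only [altExpand, List.mem_flatMap, List.mem_map, PySem.List.mem_pyRange_one]
          constructor
          · rintro ⟨d, hdm, k, ⟨hk0, hk1⟩, rfl⟩
            obtain ⟨h1, h2, _⟩ := hpd d hdm
            refine ⟨mul_pos h1 (pow_pos (by omega) _), ?_⟩
            exact mul_dvd_mul h2 (pow_dvd_pow p (by omega))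
          · rintro ⟨hx0, hxd⟩
            obtain ⟨d, k, hd1, hd2, hd3, rfl⟩ :=
              (dvd_mul_pow_iff p a hpp (by omega) _ x hx0).1 hxd
            refine ⟨d, (hmem d).2 ⟨hd1, hd2⟩, (k : Int), ⟨by omega, by omega⟩, by simp⟩
        have hexp_nd : (altExpand dvs p (altStrip m p).2).Nodup := by
          rw [altExpand, List.nodup_flatMap]
          constructor
          · intro d hdm
            obtain ⟨h1, _, _⟩ := hpd d hdm
            refine (PySem.List.nodup_pyRange_one 0 ((altStrip m p).2 + 1)).map_on ?_
            intro k1 hk1 k2 hk2 he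
            have hk1' := (PySem.List.mem_pyRange_one).1 hk1
            have hk2' := (PySem.List.mem_pyRange_one).1 hk2
            have hpe : p ^ k1.toNat = p ^ k2.toNat := mul_left_cancel₀ (by omega) he
            have : k1.toNat = k2.toNat := by
              by_contra hne
              rcases Nat.lt_or_ge k1.toNat k2.toNat with hlt | hge
              · have := pow_lt_pow_right₀ (a := p) (by omega) hlt
                omega
              · have hlt2 : k2.toNat < k1.toNat := by omega
                have := pow_lt_pow_right₀ (a := p) (by omega) hlt2
                omega
            omega
          · refine hnd.imp_of_mem ?_
            intro d d' hdm hdm' hne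
            obtain ⟨h1, h2, h3⟩ := hpd d hdm
            obtain ⟨h1', h2', h3'⟩ := hpd d' hdm'
            intro x hx hx'
            obtain ⟨k1, _, rfl⟩ := List.mem_map.1 hx
            obtain ⟨k2, _, he⟩ := List.mem_map.1 hx'
            exact hne ((pow_mul_inj p d' d (by omega) h3' h3 h1' _ _ he).2).symm
        have hr1m : (altStrip m p).1 ∣ m := ⟨p ^ (altStrip m p).2.toNat, hs3⟩
        have hapos : 0 < a * p ^ (altStrip m p).2.toNat :=
          mul_pos (by omega) (pow_pos (by omega) _)
        have hfuel : ((altStrip m p).1 + 1 - (p + 1)).toNat ≤ f := by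
          have h1 := altStrip_fst_lt m p hg.1 hm0 hd
          have h2 : p ≤ m := by nlinarith [hg.1, hg.2]
          omega
        obtain ⟨b, hb1, hb2, hb3, hb4, hb5, hb6⟩ := ih (altExpand dvs p (altStrip m p).2)
          (altStrip m p).1 (p + 1) (a * p ^ (altStrip m p).2.toNat)
          (by omega) hs1 (by omega)
          (fun q hq hq0 hqm => by
            have hge := hpfm q hq hq0 (hqm.trans hr1m)
            have : q ≠ p := fun he => hs4 (by rw [he] at hqm; exact hqm)
            omega)
          (fun q hq hq0 hqa => by
            rcases (Prime.dvd_mul hq).1 hqa with hc | hc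
            · have := hpfa q hq hq0 hc; omega
            · have := prime_dvd_prime q p hq hpp hq0 (by omega) (hq.dvd_of_dvd_pow hc)
              omega)
          hexp_nd hexp_mem hfuel
        refine ⟨b, hb1, ?_, hb3, hb4, hb5, hb6⟩
        calc a * m = a * p ^ (altStrip m p).2.toNat * (altStrip m p).1 := by
              conv_lhs => rw [hs3]
              ring
          _ = b * (altOuterF f (altExpand dvs p (altStrip m p).2) (altStrip m p).1 (p + 1)).2 :=
            hb2
      · rw [if_neg hd]
        have hndvd : ¬ p ∣ m := fun hdd => hd ((PySem.Int.mod_eq_zero_iff_dvd m p).2 hdd)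
        have hfuel : (m + 1 - (p + 1)).toNat ≤ f := by
          have h2 : p ≤ m := by nlinarith [hg.1, hg.2]
          omega
        exact ih dvs m (p + 1) a (by omega) hm1 ha
          (fun q hq hq0 hqm => by
            have := hpfm q hq hq0 hqm
            have : q ≠ p := fun he => hndvd (he ▸ hqm)
            omega)
          (fun q hq hq0 hqa => by have := hpfa q hq hq0 hqa; omega)
          hnd hmem hfuel
    · rw [if_neg hg]
      have hmlt : m < p * p := by
        rcases not_and_or.1 hg with h1 | h2
        · omega
        · omega
      exact exitCase dvs m p a hp hm1 ha hpfm hpfa hnd hmem hmlt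

theorem altOuter_spec (dvs : List Int) (m p : Int) (a : Int) (hp : 2 ≤ p) (hm : 1 ≤ m)
    (ha : 1 ≤ a)
    (hpfm : ∀ q : Int, Prime q → 0 < q → q ∣ m → p ≤ q)
    (hpfa : ∀ q : Int, Prime q → 0 < q → q ∣ a → q < p)
    (hnd : dvs.Nodup) (hmem : ∀ x, x ∈ dvs ↔ 0 < x ∧ x ∣ a) :
    ∃ b : Int, 1 ≤ b ∧ a * m = b * (altOuter dvs m p).2 ∧
      (altOuter dvs m p).1.Nodup ∧
      (∀ x, x ∈ (altOuter dvs m p).1 ↔ 0 < x ∧ x ∣ b) ∧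
      1 ≤ (altOuter dvs m p).2 ∧
      ((altOuter dvs m p).2 = 1 ∨ (Prime (altOuter dvs m p).2 ∧ ¬ (altOuter dvs m p).2 ∣ b)) :=
  altOuterF_spec ((m + 1 - p).toNat) dvs m p a hp hm ha hpfm hpfa hnd hmem (le_refl _)

-- B's pre-sort list: nodup and exactly the positive divisors of n
theorem B_list_spec (n : Int) (hn : 1 ≤ n) :
    (if 1 < (altOuter [1] n 2).2 then
        (altOuter [1] n 2).1.flatMap (fun x => [x, x * (altOuter [1] n 2).2])
      else (altOuter [1] n 2).1).Nodup ∧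
    ∀ x, x ∈ (if 1 < (altOuter [1] n 2).2 then
        (altOuter [1] n 2).1.flatMap (fun x => [x, x * (altOuter [1] n 2).2])
      else (altOuter [1] n 2).1) ↔ 0 < x ∧ x ∣ n := by
  obtain ⟨b, hb1, hb2, hb3, hb4, hb5, hb6⟩ := altOuter_spec [1] n 2 1 (le_refl 2) hn (le_refl 1)
    (fun q hq hq0 _ => prime_two_le q hq hq0)
    (fun q hq hq0 hq1 => absurd (Int.eq_one_of_dvd_one (by omega) hq1)
      (by have := prime_two_le q hq hq0; omega))
    (List.nodup_singleton 1)
    (fun x => by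
      simp only [List.mem_singleton]
      constructor
      · rintro rfl; exact ⟨one_pos, one_dvd 1⟩
      · rintro ⟨h1, h2⟩; exact Int.eq_one_of_dvd_one (by omega) h2)
  rw [one_mul] at hb2
  by_cases hc : 1 < (altOuter [1] n 2).2
  · rw [if_pos hc]
    obtain ⟨hprime, hndvd⟩ := hb6.resolve_left (by omega)
    have hb0 : 0 < b := by omega
    have hm0 : (0:Int) < (altOuter [1] n 2).2 := by omega
    constructor
    · rw [List.nodup_flatMap]
      constructor
      · intro x hx
        obtain ⟨hx0, _⟩ := (hb4 x).1 hx
        simp only [List.nodup_cons, List.mem_singleton, List.not_mem_nil, not_false_iff,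
          List.nodup_singleton, and_true]
        refine ⟨fun he => ?_, trivial, List.nodup_nil⟩
        nlinarith [he]
      · refine hb3.imp_of_mem ?_
        intro x x' hx hx' hne
        obtain ⟨hx0, hxb⟩ := (hb4 x).1 hx
        obtain ⟨hx0', hxb'⟩ := (hb4 x').1 hx'
        intro y hy hy'
        simp only [List.mem_cons, List.mem_singleton, List.not_mem_nil, or_false] at hy hy'
        rcases hy with rfl | rfl <;> rcases hy' with he | he
        · exact hne he
        · exact hndvd (dvd_trans ⟨x', by rw [he]; ring⟩ hxb)
        · exact hndvd (dvd_trans ⟨x, by rw [← he]; ring⟩ hxb')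
        · exact hne (mul_right_cancel₀ (by omega) he)
    · intro y
      rw [List.mem_flatMap]
      constructor
      · rintro ⟨x, hx, hy⟩
        obtain ⟨hx0, hxb⟩ := (hb4 x).1 hx
        simp only [List.mem_cons, List.mem_singleton, List.not_mem_nil, or_false] at hy
        rcases hy with rfl | rfl
        · exact ⟨hx0, by rw [hb2]; exact dvd_mul_of_dvd_left hxb _⟩
        · refine ⟨mul_pos hx0 hm0, ?_⟩
          conv_rhs => rw [hb2]
          exact mul_dvd_mul hxb dvd_rfl
      · rintro ⟨hy0, hyn⟩
        rw [hb2] at hyn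
        by_cases hdy : (altOuter [1] n 2).2 ∣ y
        · obtain ⟨y', hy'⟩ := hdy
          have hy'0 : 0 < y' := by nlinarith
          obtain ⟨c, hcc⟩ := hyn
          have hy'b : y' ∣ b := by
            refine ⟨c, ?_⟩
            have : (altOuter [1] n 2).2 * (y' * c) = (altOuter [1] n 2).2 * b := by
              rw [← mul_assoc, ← hy', ← hcc]; ring
            exact (mul_left_cancel₀ (by omega) this).symm
          exact ⟨y', (hb4 y').2 ⟨hy'0, hy'b⟩, by simp [hy', mul_comm]⟩
        · have hcop : IsCoprime y (altOuter [1] n 2).2 :=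
            ((Prime.coprime_iff_not_dvd hprime).2 hdy).symm
          have : y ∣ b := hcop.dvd_of_dvd_mul_right hyn
          exact ⟨y, (hb4 y).2 ⟨hy0, this⟩, by simp⟩
  · rw [if_neg hc]
    have hm1 : (altOuter [1] n 2).2 = 1 := by omega
    rw [hm1, mul_one] at hb2
    subst hb2
    exact ⟨hb3, hb4⟩

-- ===== VERDICT (by name: the statement is the Claim_ definition above) =====
theorem divisorGenerator_spec : Claim_equal_divisorGenerator := by
  unfold Claim_equal_divisorGenerator
  intro n hdom hpre
  unfold Spec_divisorGenerator
  have hdom' : -2147483648 ≤ n ∧ n ≤ 2147483648 := by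
    unfold Dom_divisorGenerator pvDomInt at hdom
    exact of_decide_eq_true hdom
  by_cases hz : n ≤ 0
  · have hn0 : n = 0 := le_antisymm hz hpre
    subst hn0
    decide
  · have hA := A_pairwise n hpre (by omega)
    obtain ⟨hBnd, hBmem⟩ := B_list_spec n (by omega)
    rw [divisorGenerator_alt, if_neg hz]
    refine (PySem.List.sorted_eq_of_perm_of_pairwise_lt _ _ (fun x : Int => x) ?_ ?_).symm
    · refine (List.perm_ext_iff_of_nodup hA.nodup hBnd).2 ?_
      intro x
      rw [A_mem n (by omega) (by omega) x, hBmem x]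
    · exact hA
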